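-- pv_equiv track=rewrite | github.com/kavanaghpatrick/aristotle-math-problems | scripts/ft_a_quadform.py | find_rep_x2_9y2
-- ===== SOURCE A (Python) =====
-- from math import isqrt
--
-- def find_rep_x2_9y2(n):
--     """Find (x, y) with n = x^2 + 9*y^2, x >= 0, y > 0, or None."""
--     max_y = isqrt(n // 9)
--     for y in range(1, max_y + 1):
--         rem = n - 9 * y * y
--         if rem < 0:
--             break
--         if rem == 0:
--             return (0, y)
--         x = isqrt(rem)
--         if x * x == rem:
--             return (x, y)
--     return None
-- ===== SOURCE B (Python) =====
-- from math import isqrt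
--
-- def find_rep_x2_9y2(n):
--     """Find (x, y) with n = x^2 + 9*y^2, x >= 0, y > 0, or None."""
--     x = isqrt(n)
--     y = 1
--     while 9 * y * y <= n:
--         rem = n - 9 * y * y
--         while x * x > rem:
--             x -= 1
--         if x * x == rem:
--             return (x, y)
--         y += 1
--     return None
-- ===== Notes on version B (the rewrite author's own statement) =====
-- stated objective: alternative
-- what changed: B replaces A's per-iteration isqrt perfect-square test with a two-pointer sweep: y ascends while a single x pointer only ever descends from isqrt(n), so each y step does O(1) amortised work and the first hit is A's smallest-y answer.
import Mathlib
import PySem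

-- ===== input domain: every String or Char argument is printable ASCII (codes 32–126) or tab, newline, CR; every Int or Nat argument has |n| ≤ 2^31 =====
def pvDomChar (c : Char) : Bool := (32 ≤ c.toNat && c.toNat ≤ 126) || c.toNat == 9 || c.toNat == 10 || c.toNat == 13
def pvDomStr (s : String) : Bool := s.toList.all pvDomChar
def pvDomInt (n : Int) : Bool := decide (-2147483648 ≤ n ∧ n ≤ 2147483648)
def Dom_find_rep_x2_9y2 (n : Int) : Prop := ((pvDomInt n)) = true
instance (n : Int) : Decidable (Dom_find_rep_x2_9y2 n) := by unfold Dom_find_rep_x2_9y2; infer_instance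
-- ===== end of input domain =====

-- B replaces A's per-iteration isqrt perfect-square test with a two-pointer sweep: y ascends
-- while a single x pointer only descends from isqrt(n). Objective: alternative algorithm.

-- math.isqrt: floor square root, exact for 0 ≤ m; ValueError for m < 0, modelled as none
def pyIsqrt? (m : Int) : Option Int :=
  if m < 0 then none else some (Int.ofNat (Nat.sqrt m.toNat))

-- ===== PORT A =====
def aLoop (n : Int) : List Int → Option (Int × Int)
  | [] => none
  | y :: ys =>
    let rem := n - 9 * y * y
    if rem < 0 then none                     -- break
    else if rem = 0 then some (0, y)
    else match pyIsqrt? rem with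
      | none => none                         -- unreachable: rem > 0
      | some x => if x * x = rem then some (x, y) else aLoop n ys

def find_rep_x2_9y2 (n : Int) : Option (Int × Int) :=
  match pyIsqrt? (PySem.Int.floordiv n 9) with
  | none => none                             -- isqrt raised: n < 0 (outside Pre_)
  | some max_y => aLoop n (PySem.List.pyRange 1 (max_y + 1) 1)

-- ===== PORT B =====
-- inner 'while x * x > rem: x -= 1'. Fuel x.toNat makes the recursion structural; it is
-- exact for the admitted calls, where rem >= 0 stops the loop no later than x = 0.
def bInner (rem : Int) : Nat → Int → Int
  | 0, x => x
  | fuel + 1, x => if rem < x * x then bInner rem fuel (x - 1) else x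

-- outer 'while 9 * y * y <= n: ...'. Fuel bounds the iteration count (isqrt(n)+1 suffices,
-- as y ≤ isqrt(n) whenever the loop condition holds).
def bOuter (n : Int) : Nat → Int → Int → Option (Int × Int)
  | 0, _, _ => none
  | fuel + 1, x, y =>
    if 9 * y * y ≤ n then
      let rem := n - 9 * y * y
      let x' := bInner rem x.toNat x
      if x' * x' = rem then some (x', y)
      else bOuter n fuel x' (y + 1)
    else none

def find_rep_x2_9y2_alt (n : Int) : Option (Int × Int) :=
  match pyIsqrt? n with
  | none => none                             -- isqrt raised: n < 0 (outside Pre_)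
  | some r => bOuter n (r.toNat + 1) r 1

-- ===== PRECONDITION & SPEC =====
-- Pre_ excludes n < 0, where A (and B) raise ValueError from math.isqrt.
def Pre_find_rep_x2_9y2 (n : Int) : Prop := 0 ≤ n
instance (n : Int) : Decidable (Pre_find_rep_x2_9y2 n) := by unfold Pre_find_rep_x2_9y2; infer_instance
def pvWitness_find_rep_x2_9y2 : Int := (45)

def Spec_find_rep_x2_9y2 (n : Int) (out : Option (Int × Int)) : Prop := out = find_rep_x2_9y2_alt n
instance (n : Int) (out : Option (Int × Int)) : Decidable (Spec_find_rep_x2_9y2 n out) := by unfold Spec_find_rep_x2_9y2; infer_instance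

-- ===== CLAIM (what is proved, stated in full; the proofs are below) =====
def Claim_equal_find_rep_x2_9y2 : Prop := ∀ (n : Int), Dom_find_rep_x2_9y2 n → Pre_find_rep_x2_9y2 n → Spec_find_rep_x2_9y2 n (find_rep_x2_9y2 n)

-- ===== LEMMAS AND PROOFS =====

-- (x, y) is a representation n = x^2 + 9 y^2 with x ≥ 0, y ≥ 1
def GoodRep (n x y : Int) : Prop := 0 ≤ x ∧ 1 ≤ y ∧ x * x + 9 * (y * y) = n

theorem isqrt_some {m : Int} (h : 0 ≤ m) :
    ∃ s : Int, pyIsqrt? m = some s ∧ 0 ≤ s ∧ s * s ≤ m ∧ m < (s + 1) * (s + 1) := by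
  refine ⟨Int.ofNat (Nat.sqrt m.toNat), by simp [pyIsqrt?, not_lt.mpr h],
    Int.natCast_nonneg _, ?_, ?_⟩
  · have h1 := Nat.sqrt_le' m.toNat
    rw [Nat.pow_two] at h1
    have h2 : ((Nat.sqrt m.toNat * Nat.sqrt m.toNat : Nat) : Int) ≤ ((m.toNat : Nat) : Int) :=
      Int.ofNat_le.mpr h1
    push_cast at h2
    rw [Int.toNat_of_nonneg h] at h2
    exact_mod_cast h2
  · have h1 := Nat.lt_succ_sqrt' m.toNat
    rw [Nat.pow_two] at h1
    have h2 : ((m.toNat : Nat) : Int) < ((Nat.succ (Nat.sqrt m.toNat) * Nat.succ (Nat.sqrt m.toNat) : Nat) : Int) :=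
      Int.ofNat_lt.mpr h1
    push_cast at h2
    rw [Int.toNat_of_nonneg h] at h2
    exact_mod_cast h2

theorem isqrt_of_sq {x : Int} (h : 0 ≤ x) : pyIsqrt? (x * x) = some x := by
  have hx : x = ((x.toNat : Nat) : Int) := (Int.toNat_of_nonneg h).symm
  rw [hx]
  have h1 : ((x.toNat : Nat) : Int) * ((x.toNat : Nat) : Int) = ((x.toNat * x.toNat : Nat) : Int) := by
    push_cast; ring
  rw [h1]
  have h2 : (0:Int) ≤ ((x.toNat * x.toNat : Nat) : Int) := Int.natCast_nonneg _
  have h3 : (x.toNat * x.toNat).sqrt = x.toNat := by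
    have := Nat.sqrt_eq' x.toNat
    simpa [Nat.pow_two] using this
  simp only [pyIsqrt?, if_neg (not_lt.mpr h2), Int.toNat_natCast, h3]
  rfl

-- ---- A-side loop lemmas ----

theorem aLoop_none (n : Int) (hno : ∀ x y, ¬ GoodRep n x y) :
    ∀ l : List Int, (∀ y ∈ l, 1 ≤ y) → aLoop n l = none := by
  intro l
  induction l with
  | nil => intro _; rfl
  | cons y ys ih =>
    intro hmem
    have hy : 1 ≤ y := hmem y (List.mem_cons_self)
    simp only [aLoop]
    by_cases h0 : n - 9 * y * y < 0
    · simp [h0]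
    · by_cases he : n - 9 * y * y = 0
      · exact absurd ⟨le_refl 0, hy, by linarith⟩ (hno 0 y)
      · have hpos : 0 ≤ n - 9 * y * y := by omega
        obtain ⟨s, hs, hs0, hsle, _⟩ := isqrt_some hpos
        simp only [h0, if_false, he, if_false, hs]
        by_cases hsq : s * s = n - 9 * y * y
        · exact absurd ⟨hs0, hy, by linarith⟩ (hno s y)
        · simp only [hsq, if_false]
          exact ih (fun z hz => hmem z (List.mem_cons_of_mem _ hz))

theorem aLoop_skip (n : Int) (l1 l2 : List Int)
    (h : ∀ y ∈ l1, 1 ≤ y ∧ 0 < n - 9 * y * y ∧ ∀ x, ¬ GoodRep n x y) :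
    aLoop n (l1 ++ l2) = aLoop n l2 := by
  induction l1 with
  | nil => rfl
  | cons y ys ih =>
    obtain ⟨hy, hpos, hno⟩ := h y (List.mem_cons_self)
    simp only [List.cons_append, aLoop]
    obtain ⟨s, hs, hs0, hsle, _⟩ := isqrt_some (le_of_lt hpos)
    have h0 : ¬ n - 9 * y * y < 0 := by omega
    have he : ¬ n - 9 * y * y = 0 := by omega
    simp only [h0, if_false, he, if_false, hs]
    by_cases hsq : s * s = n - 9 * y * y
    · exact absurd ⟨hs0, hy, by linarith⟩ (hno s)
    · simp only [hsq, if_false]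
      exact ih (fun z hz => h z (List.mem_cons_of_mem _ hz))

theorem aLoop_hit (n x y : Int) (hg : GoodRep n x y) (l : List Int) :
    aLoop n (y :: l) = some (x, y) := by
  obtain ⟨hx, hy, heq⟩ := hg
  have hrem : n - 9 * y * y = x * x := by linarith
  simp only [aLoop]
  by_cases hx0 : x = 0
  · subst hx0
    simp [hrem]
  · have hp : 0 < x * x := by positivity
    have h0 : ¬ n - 9 * y * y < 0 := by omega
    have he : ¬ n - 9 * y * y = 0 := by omega
    rw [if_neg h0, if_neg he, hrem, isqrt_of_sq hx]
    simp

-- ---- B-side lemmas ----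

-- the descending x pointer lands exactly on the floor square root of rem
theorem bInner_eq (fuel : Nat) : ∀ (rem x s : Int), 0 ≤ rem → 0 ≤ x →
    rem < (x + 1) * (x + 1) → 0 ≤ s → s * s ≤ rem → rem < (s + 1) * (s + 1) →
    x.toNat ≤ fuel → bInner rem fuel x = s := by
  induction fuel with
  | zero =>
    intro rem x s hrem hx0 hxub hs0 hsle hsub hf
    have hx : x = 0 := by omega
    subst hx
    have : s = 0 := by nlinarith
    simpa [bInner] using this.symm
  | succ f ih =>
    intro rem x s hrem hx0 hxub hs0 hsle hsub hf
    simp only [bInner]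
    by_cases hlt : rem < x * x
    · rw [if_pos hlt]
      have hsx : s < x := by nlinarith
      exact ih rem (x - 1) s hrem (by omega) (by nlinarith) hs0 hsle hsub (by omega)
    · rw [if_neg hlt]
      push_neg at hlt
      have h1 : x < s + 1 := by nlinarith
      have h2 : s < x + 1 := by nlinarith
      omega

theorem bOuter_finds (n x0 y0 : Int) (hg : GoodRep n x0 y0)
    (hmin : ∀ x' y', GoodRep n x' y' → y0 ≤ y') :
    ∀ (fuel : Nat) (x y : Int), 1 ≤ y → y ≤ y0 → 0 ≤ x →
      n - 9 * y * y < (x + 1) * (x + 1) → (y0 - y).toNat < fuel →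
      bOuter n fuel x y = some (x0, y0) := by
  obtain ⟨hx0, hy0, heq⟩ := hg
  intro fuel
  induction fuel with
  | zero => intro x y _ _ _ _ hf; omega
  | succ f ih =>
    intro x y hy1 hyle hx hub hf
    have hcond : 9 * y * y ≤ n := by nlinarith
    have hrem : 0 ≤ n - 9 * y * y := by linarith
    simp only [bOuter, if_pos hcond]
    by_cases hy : y = y0
    · subst hy
      have hremx : n - 9 * y * y = x0 * x0 := by linarith
      have hx' : bInner (n - 9 * y * y) x.toNat x = x0 :=
        bInner_eq x.toNat (n - 9 * y * y) x x0 hrem hx hub hx0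
          (by linarith) (by nlinarith) (le_refl _)
      rw [hx', if_pos hremx.symm]
    · have hylt : y < y0 := by omega
      obtain ⟨s, _, hs0, hsle, hsub⟩ := isqrt_some hrem
      have hx' : bInner (n - 9 * y * y) x.toNat x = s :=
        bInner_eq x.toNat (n - 9 * y * y) x s hrem hx hub hs0 hsle hsub (le_refl _)
      rw [hx']
      have hne : ¬ s * s = n - 9 * y * y := by
        intro hsq
        exact absurd (hmin s y ⟨hs0, hy1, by linarith⟩) (by omega)
      rw [if_neg hne]
      exact ih s (y + 1) (by omega) (by omega) hs0 (by nlinarith) (by omega)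

theorem bOuter_none (n r : Int) (hno : ∀ x y, ¬ GoodRep n x y)
    (hr0 : 0 ≤ r) (hrub : n < (r + 1) * (r + 1)) :
    ∀ (fuel : Nat) (x y : Int), 1 ≤ y → 0 ≤ x →
      n - 9 * y * y < (x + 1) * (x + 1) → (r + 2 - y).toNat ≤ fuel →
      bOuter n fuel x y = none := by
  intro fuel
  induction fuel with
  | zero => intro x y _ _ _ _; rfl
  | succ f ih =>
    intro x y hy1 hx hub hf
    simp only [bOuter]
    by_cases hcond : 9 * y * y ≤ n
    · rw [if_pos hcond]
      have hrem : 0 ≤ n - 9 * y * y := by linarith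
      obtain ⟨s, _, hs0, hsle, hsub⟩ := isqrt_some hrem
      have hx' : bInner (n - 9 * y * y) x.toNat x = s :=
        bInner_eq x.toNat (n - 9 * y * y) x s hrem hx hub hs0 hsle hsub (le_refl _)
      rw [hx']
      have hne : ¬ s * s = n - 9 * y * y := by
        intro hsq
        exact hno s y ⟨hs0, hy1, by linarith⟩
      rw [if_neg hne]
      have h3y : 3 * y < r + 1 := by nlinarith
      exact ih s (y + 1) (by omega) hs0 (by nlinarith) (by omega)
    · rw [if_neg hcond]

-- A returns the minimal-y representation
theorem A_finds (n x y : Int) (hn : 0 ≤ n) (hg : GoodRep n x y)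
    (hmin : ∀ x' y', GoodRep n x' y' → y ≤ y') : find_rep_x2_9y2 n = some (x, y) := by
  obtain ⟨hx, hy, heq⟩ := hg
  have hd0 : 0 ≤ PySem.Int.floordiv n 9 :=
    (PySem.Int.le_floordiv_iff_mul_le (by norm_num)).mpr (by linarith)
  obtain ⟨s, hs, hs0, hsle, hslt⟩ := isqrt_some hd0
  have hyle : y ≤ s := by
    have h1 : y * y ≤ PySem.Int.floordiv n 9 :=
      (PySem.Int.le_floordiv_iff_mul_le (by norm_num)).mpr (by nlinarith)
    by_contra hc
    push_neg at hc
    nlinarith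
  simp only [find_rep_x2_9y2, hs]
  rw [PySem.List.pyRange_one_append 1 y (s + 1) hy (by omega),
      PySem.List.pyRange_one_cons (by omega : y < s + 1)]
  rw [aLoop_skip]
  · exact aLoop_hit n x y ⟨hx, hy, heq⟩ _
  · intro z hz
    rw [PySem.List.mem_pyRange_one] at hz
    refine ⟨hz.1, by nlinarith [hz.2], fun x' hx' => ?_⟩
    exact absurd (hmin x' z hx') (by omega)

-- B's sweep returns the same minimal-y representation
theorem B_finds (n x y : Int) (hn : 0 ≤ n) (hg : GoodRep n x y)
    (hmin : ∀ x' y', GoodRep n x' y' → y ≤ y') : find_rep_x2_9y2_alt n = some (x, y) := by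
  obtain ⟨r, hr, hr0, hrle, hrlt⟩ := isqrt_some hn
  simp only [find_rep_x2_9y2_alt, hr]
  have hy1 : 1 ≤ y := hg.2.1
  have h9 : 9 * y * y ≤ n := by nlinarith [hg.1, hg.2.2, hg.2.1]
  have h3y : 3 * y < r + 1 := by nlinarith
  exact bOuter_finds n x y hg hmin (r.toNat + 1) r 1 (le_refl 1) hy1 hr0
    (by nlinarith) (by omega)

theorem A_none (n : Int) (hn : 0 ≤ n) (hno : ∀ x y, ¬ GoodRep n x y) :
    find_rep_x2_9y2 n = none := by
  have hd0 : 0 ≤ PySem.Int.floordiv n 9 :=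
    (PySem.Int.le_floordiv_iff_mul_le (by norm_num)).mpr (by linarith)
  obtain ⟨s, hs, _, _, _⟩ := isqrt_some hd0
  simp only [find_rep_x2_9y2, hs]
  exact aLoop_none n hno _ (fun y hy => ((PySem.List.mem_pyRange_one).mp hy).1)

theorem B_none (n : Int) (hn : 0 ≤ n) (hno : ∀ x y, ¬ GoodRep n x y) :
    find_rep_x2_9y2_alt n = none := by
  obtain ⟨r, hr, hr0, hrle, hrlt⟩ := isqrt_some hn
  simp only [find_rep_x2_9y2_alt, hr]
  exact bOuter_none n r hno hr0 hrlt (r.toNat + 1) r 1 (le_refl 1) hr0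
    (by nlinarith) (by omega)

-- ===== VERDICT (by name: the statement is the Claim_ definition above) =====
theorem find_rep_x2_9y2_spec : Claim_equal_find_rep_x2_9y2 := by
  intro n _ hpre
  unfold Spec_find_rep_x2_9y2
  have hn : 0 ≤ n := hpre
  by_cases hex : ∃ x y, GoodRep n x y
  · -- extract a minimal-y representation via Nat.find
    obtain ⟨x0, y0, hx0, hy0, heq0⟩ := hex
    have hexN : ∃ yn : Nat, ∃ xn : Nat,
        (xn : Int) * xn + 9 * ((yn : Int) * yn) = n ∧ 1 ≤ yn := by
      refine ⟨y0.toNat, x0.toNat, ?_, by omega⟩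
      push_cast [Int.toNat_of_nonneg hx0, Int.toNat_of_nonneg (by omega : (0:Int) ≤ y0)]
      linarith
    haveI : DecidablePred (fun yn : Nat => ∃ xn : Nat,
        (xn : Int) * xn + 9 * ((yn : Int) * yn) = n ∧ 1 ≤ yn) :=
      fun _ => Classical.propDecidable _
    obtain ⟨xn, hxn, hyn1⟩ := Nat.find_spec hexN
    set yn := Nat.find hexN with hyndef
    have hgood : GoodRep n (xn : Int) (yn : Int) := by
      exact ⟨by positivity, by exact_mod_cast hyn1, by linarith⟩
    have hmin : ∀ x' y', GoodRep n x' y' → (yn : Int) ≤ y' := by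
      intro x' y' ⟨hx', hy', he'⟩
      have h1 : yn ≤ y'.toNat := by
        apply Nat.find_le
        refine ⟨x'.toNat, ?_, by omega⟩
        push_cast [Int.toNat_of_nonneg hx', Int.toNat_of_nonneg (by omega : (0:Int) ≤ y')]
        linarith
      omega
    rw [A_finds n xn yn hn hgood hmin, B_finds n xn yn hn hgood hmin]
  · push_neg at hex
    rw [A_none n hn (fun x y h => hex x y h), B_none n hn (fun x y h => hex x y h)]
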